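-- pv_equiv track=rewrite | github.com/ZlayaZayaZ/-seating_arrangement | Var_sudocu.py | create_base_dict
-- ===== SOURCE A (Python) =====
-- def create_base_dict(nicks):
--     """Функция создает словарь, ключами которого являются номера игр,
--     а значениями - имена игроков в порядке слотов за столом"""
--
--     base_people_slots = {}
--     for i in range(1, 11):
--
--         # i - порядковый номер игры, nick.copy() - копия существующего списка игроков
--         # списки являются изменяемыми элементами и если присваивать каждой игре список
--         # игроков не копируя его - все столы будут иметь один и тот же порядок игроков
--         # так устроена память в питоне
--         base_people_slots[i] = nicks.copy()
--
--         # создаем сдвиг игроков относительно слотов за столом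
--         # здесь мы меняем сам порядок игроков в исходном списке
--         shift = nicks[0]
--         nicks.remove(shift)
--         nicks.append(shift)
--     return base_people_slots
-- ===== SOURCE B (Python) =====
-- def create_base_dict(nicks):
--     """Словарь: ключ = номер игры 1..10, значение = игроки, сдвинутые на (i-1) слотов."""
--     original = nicks.copy()
--     n = len(nicks)
--     base = {i: original[(i - 1) % n:] + original[:(i - 1) % n] for i in range(1, 11)}
--     # same in-place side effect as the original: nicks ends up rotated left 10 times
--     nicks[:] = original[10 % n:] + original[:10 % n]
--     return base
-- ===== Notes on version B (the rewrite author's own statement) =====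
-- stated objective: alternative
-- what changed: Each of the 10 rotations is computed directly from the fixed original list by modular slicing (original[(i-1)%n:] + original[:(i-1)%n]) instead of repeatedly mutating the list one shift at a time; the input is mutated once at the end to reproduce A's side effect.
import Mathlib
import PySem

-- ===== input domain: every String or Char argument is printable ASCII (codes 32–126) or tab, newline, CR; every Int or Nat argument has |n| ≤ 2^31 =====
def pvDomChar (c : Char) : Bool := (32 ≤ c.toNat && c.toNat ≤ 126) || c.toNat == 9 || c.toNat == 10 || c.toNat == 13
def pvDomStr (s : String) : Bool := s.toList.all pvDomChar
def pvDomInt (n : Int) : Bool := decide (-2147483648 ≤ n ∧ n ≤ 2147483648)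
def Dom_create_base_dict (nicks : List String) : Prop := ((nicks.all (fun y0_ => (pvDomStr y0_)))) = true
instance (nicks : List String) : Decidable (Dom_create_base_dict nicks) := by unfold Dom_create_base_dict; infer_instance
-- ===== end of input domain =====

-- B computes each of the 10 rotated copies directly from the fixed original list by modular
-- slicing, instead of A's repeated one-step mutation; equivalence is about the RETURN value
-- (both Pythons also leave nicks rotated left 10 times in place).

-- ===== PORT A =====
-- one loop step: base[i] = nicks.copy(); shift = nicks[0]; nicks.remove(shift); nicks.append(shift)
def pvStepA (st : PySem.Dict Int (List String) × List String) (i : Int) :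
    PySem.Dict Int (List String) × List String :=
  let d := st.1.insert i st.2
  match PySem.List.pyGet? st.2 0 with
  | none => (d, st.2)          -- IndexError in Python (empty list); excluded by Pre_
  | some shift =>
    match PySem.List.remove? st.2 shift with
    | none => (d, st.2)        -- unreachable: shift is an element of st.2
    | some rest => (d, rest ++ [shift])

def create_base_dict (nicks : List String) : List (Int × List String) :=
  ((PySem.List.pyRange 1 11 1).foldl pvStepA (PySem.Dict.empty, nicks)).1.items

-- ===== PORT B =====
-- {i: original[(i-1)%n:] + original[:(i-1)%n] for i in range(1, 11)}  (fresh keys 1..10 → assoc list)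
def create_base_dict_alt (nicks : List String) : List (Int × List String) :=
  let n : Int := (nicks.length : Int)
  (PySem.List.pyRange 1 11 1).map (fun i =>
    (i, PySem.List.slice nicks (some (PySem.Int.mod (i - 1) n)) none
        ++ PySem.List.slice nicks none (some (PySem.Int.mod (i - 1) n))))

-- ===== PRECONDITION & SPEC =====
-- Pre_ excludes only the empty list, on which A raises IndexError (nicks[0]); B raises there too.
def Pre_create_base_dict (nicks : List String) : Prop := nicks ≠ []
instance (nicks : List String) : Decidable (Pre_create_base_dict nicks) := by
  unfold Pre_create_base_dict; infer_instance

def pvWitness_create_base_dict : List String := ["alice", "bob", "carol"]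

def Spec_create_base_dict (nicks : List String) (out : List (Int × List String)) : Prop := out = create_base_dict_alt nicks
instance (nicks : List String) (out : List (Int × List String)) : Decidable (Spec_create_base_dict nicks out) := by unfold Spec_create_base_dict; infer_instance

-- ===== CLAIM (what is proved, stated in full; the proofs are below) =====
def Claim_equal_create_base_dict : Prop := ∀ (nicks : List String), Dom_create_base_dict nicks → Pre_create_base_dict nicks → Spec_create_base_dict nicks (create_base_dict nicks)

-- ===== LEMMAS AND PROOFS =====

-- one left rotation of a list, and k of them (A's loop state after k iterations)
def pvRot1 {α : Type} (l : List α) : List α := l.drop 1 ++ l.take 1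

def pvRotN {α : Type} : Nat → List α → List α
  | 0, l => l
  | k + 1, l => pvRot1 (pvRotN k l)

theorem pvRot1_ne {α : Type} (l : List α) (hl : l ≠ []) : pvRot1 l ≠ [] := by
  cases l with
  | nil => exact absurd rfl hl
  | cons x xs => simp [pvRot1]

-- on a nonempty list, one iteration of A's loop body inserts the current list and rotates it left
theorem pvStepA_ne (d : PySem.Dict Int (List String)) (l : List String) (hl : l ≠ []) (i : Int) :
    pvStepA (d, l) i = (d.insert i l, pvRot1 l) := by
  cases l with
  | nil => exact absurd rfl hl
  | cons x xs => simp [pvStepA, PySem.List.pyGet?, PySem.List.pyIdx?, pvRot1]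

theorem pvFoldA_cons (k : Int) (ks : List Int) (d : PySem.Dict Int (List String))
    (l : List String) (hl : l ≠ []) :
    (k :: ks).foldl pvStepA (d, l) = ks.foldl pvStepA (d.insert k l, pvRot1 l) := by
  rw [List.foldl_cons, pvStepA_ne d l hl k]

theorem pvRot1_drop_take {α : Type} (l : List α) (m : Nat) (hm : m < l.length) :
    pvRot1 (l.drop m ++ l.take m)
      = l.drop ((m + 1) % l.length) ++ l.take ((m + 1) % l.length) := by
  have hdrop : l.drop m = l[m] :: l.drop (m + 1) := List.drop_eq_getElem_cons hm
  have ht : l.take (m + 1) = l.take m ++ [l[m]] := by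
    rw [List.take_add_one]; simp [List.getElem?_eq_getElem hm]
  by_cases h : m + 1 < l.length
  · have hmod : (m + 1) % l.length = m + 1 := Nat.mod_eq_of_lt h
    rw [hmod, ht, pvRot1, hdrop]
    simp only [List.cons_append, List.take_succ_cons, List.take_zero, List.drop_succ_cons,
      List.drop_zero, List.append_assoc]
  · have hlen : m + 1 = l.length := by omega
    have hmod : (m + 1) % l.length = 0 := by rw [hlen]; exact Nat.mod_self _
    have hnil : l.drop (m + 1) = [] := List.drop_eq_nil_of_le (by omega)
    have hfull : l.take m ++ [l[m]] = l := by rw [← ht, hlen, List.take_length]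
    rw [hmod, pvRot1, hdrop, hnil]
    simp only [List.cons_append, List.nil_append, List.take_succ_cons, List.take_zero,
      List.drop_succ_cons, List.drop_zero, List.append_nil]
    simpa using hfull

-- k left rotations = the modular slice B takes
theorem pvRotN_spec {α : Type} (l : List α) (hl : l ≠ []) (k : Nat) :
    pvRotN k l = l.drop (k % l.length) ++ l.take (k % l.length) := by
  induction k with
  | zero => simp [pvRotN]
  | succ k ih =>
    have hn : 0 < l.length := List.length_pos_of_ne_nil hl
    have hm : k % l.length < l.length := Nat.mod_lt _ hn
    have hmod : (k % l.length + 1) % l.length = (k + 1) % l.length := by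
      by_cases h1 : l.length = 1
      · simp [h1]
      · have h2 : 1 % l.length = 1 := Nat.mod_eq_of_lt (by omega)
        conv_rhs => rw [Nat.add_mod, h2]
    rw [pvRotN, ih, pvRot1_drop_take l (k % l.length) hm, hmod]

theorem pvEntry (l : List String) (hl : l ≠ []) (m : Nat) :
    PySem.List.slice l (some (PySem.Int.mod (m : Int) (l.length : Int))) none
      ++ PySem.List.slice l none (some (PySem.Int.mod (m : Int) (l.length : Int)))
    = pvRotN m l := by
  rw [PySem.Int.mod_natCast, PySem.List.slice_from_natCast, PySem.List.slice_to_natCast,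
    pvRotN_spec l hl m]

theorem pvEntryI (l : List String) (hl : l ≠ []) (m : Int) (hm : 0 ≤ m) :
    PySem.List.slice l (some (PySem.Int.mod m (l.length : Int))) none
      ++ PySem.List.slice l none (some (PySem.Int.mod m (l.length : Int)))
    = pvRotN m.toNat l := by
  have hc : m = ((m.toNat : Nat) : Int) := by omega
  rw [hc]; exact pvEntry l hl m.toNat

-- ===== VERDICT (by name: the statement is the Claim_ definition above) =====
theorem create_base_dict_spec : Claim_equal_create_base_dict := by
  intro nicks _ hpre
  unfold Spec_create_base_dict
  have hr : PySem.List.pyRange 1 11 1 = [1,2,3,4,5,6,7,8,9,10] := by decide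
  have h0 : nicks ≠ [] := hpre
  have h1 := pvRot1_ne _ h0
  have h2 := pvRot1_ne _ h1
  have h3 := pvRot1_ne _ h2
  have h4 := pvRot1_ne _ h3
  have h5 := pvRot1_ne _ h4
  have h6 := pvRot1_ne _ h5
  have h7 := pvRot1_ne _ h6
  have h8 := pvRot1_ne _ h7
  have h9 := pvRot1_ne _ h8
  unfold create_base_dict create_base_dict_alt
  rw [hr]
  rw [pvFoldA_cons _ _ _ _ h0, pvFoldA_cons _ _ _ _ h1, pvFoldA_cons _ _ _ _ h2,
    pvFoldA_cons _ _ _ _ h3, pvFoldA_cons _ _ _ _ h4, pvFoldA_cons _ _ _ _ h5,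
    pvFoldA_cons _ _ _ _ h6, pvFoldA_cons _ _ _ _ h7, pvFoldA_cons _ _ _ _ h8,
    pvFoldA_cons _ _ _ _ h9, List.foldl_nil]
  simp only [List.map]
  norm_num
  rw [pvEntryI nicks h0 0 (by norm_num), pvEntryI nicks h0 1 (by norm_num),
    pvEntryI nicks h0 2 (by norm_num), pvEntryI nicks h0 3 (by norm_num),
    pvEntryI nicks h0 4 (by norm_num), pvEntryI nicks h0 5 (by norm_num),
    pvEntryI nicks h0 6 (by norm_num), pvEntryI nicks h0 7 (by norm_num),
    pvEntryI nicks h0 8 (by norm_num), pvEntryI nicks h0 9 (by norm_num)]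
  simp [PySem.Dict.items_insert, PySem.Dict.contains_insert, PySem.Dict.empty]
  exact ⟨rfl, rfl, rfl, rfl, rfl, rfl, rfl, rfl, rfl, rfl⟩
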